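-- pv_equiv track=rewrite | github.com/karol-kokoszka/algorithms-practice | src/prefixsums/productarraywithoutcurrentelement.py | product_array_without_current_element
-- ===== SOURCE A (Python) =====
-- from typing import List
--
-- def product_array_without_current_element(nums: List[int]) -> List[int]:
--     left, right = [1] * len(nums), [1] * len(nums)
--
--     for i in range(1, len(nums)):
--         left[i] = left[i - 1] * nums[i - 1]
--         right[len(nums) - 1 - i] = right[len(nums) - i] * nums[len(nums) - i]
--
--     result = []
--     for i in range(len(nums)):
--         result.append(left[i] * right[i])
--
--     return result
-- ===== SOURCE B (Python) =====
-- def product_array_without_current_element(nums):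
--     # Divide and conquer: solve(a) returns (products-except-self of a, product of a).
--     # Combine: left answers get multiplied by the whole right product and vice versa.
--     def solve(a):
--         if not a:
--             return [], 1
--         if len(a) == 1:
--             return [1], a[0]
--         m = len(a) // 2
--         lres, lp = solve(a[:m])
--         rres, rp = solve(a[m:])
--         return [x * rp for x in lres] + [lp * y for y in rres], lp * rp
--     return solve(nums)[0]
-- ===== Notes on version B (the rewrite author's own statement) =====
-- stated objective: alternative
-- what changed: Replaces A's prefix/suffix array passes with a recursive divide-and-conquer: split the list in half, solve each half, then multiply each half's answers by the opposite half's total product.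
import Mathlib
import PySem

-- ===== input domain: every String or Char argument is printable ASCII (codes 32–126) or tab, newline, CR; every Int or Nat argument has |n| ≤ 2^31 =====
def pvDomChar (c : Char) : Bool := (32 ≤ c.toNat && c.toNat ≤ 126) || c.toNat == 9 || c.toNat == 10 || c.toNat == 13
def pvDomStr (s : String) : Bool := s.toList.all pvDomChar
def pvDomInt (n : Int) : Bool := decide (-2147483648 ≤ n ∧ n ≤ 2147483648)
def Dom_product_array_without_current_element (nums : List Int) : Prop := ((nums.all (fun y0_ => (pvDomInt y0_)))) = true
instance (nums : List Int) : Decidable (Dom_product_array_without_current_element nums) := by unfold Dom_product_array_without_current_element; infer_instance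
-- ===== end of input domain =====

-- B replaces A's prefix/suffix array passes with a recursive divide-and-conquer
-- (solve each half, multiply by the opposite half's product); alternative, same results.

-- ===== PORT A =====
-- loop body of A's index loop: left[i] = left[i-1]*nums[i-1]; right[n-1-i] = right[n-i]*nums[n-i]
def pvStepA (nums : List Int) (lr : List Int × List Int) (i : Int) : List Int × List Int :=
  (PySem.List.pySetD lr.1 i
      (PySem.List.pyGetD lr.1 (i - 1) 0 * PySem.List.pyGetD nums (i - 1) 0),
   PySem.List.pySetD lr.2 ((nums.length : Int) - 1 - i)
      (PySem.List.pyGetD lr.2 ((nums.length : Int) - i) 0 *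
        PySem.List.pyGetD nums ((nums.length : Int) - i) 0))

def product_array_without_current_element (nums : List Int) : List Int :=
  let lr := (PySem.List.pyRange 1 (nums.length : Int) 1).foldl (pvStepA nums)
      (List.replicate nums.length 1, List.replicate nums.length 1)
  (PySem.List.pyRange 0 (nums.length : Int) 1).foldl
    (fun res i => res ++ [PySem.List.pyGetD lr.1 i 0 * PySem.List.pyGetD lr.2 i 0]) []

-- ===== PORT B =====
-- solve(a) = (products-except-self of a, product of a); recursion on halves (Source B's solve)
def pvSolve : List Int → List Int × Int
  | [] => ([], 1)
  | [x] => ([1], x)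
  | x :: y :: rest =>
    let a := x :: y :: rest
    let m := a.length / 2
    let L := pvSolve (a.take m)
    let R := pvSolve (a.drop m)
    (L.1.map (· * R.2) ++ R.1.map (fun z => L.2 * z), L.2 * R.2)
termination_by a => a.length
decreasing_by
  · simp only [List.length_take, List.length_cons]; omega
  · simp only [List.length_drop, List.length_cons]; omega

def product_array_without_current_element_alt (nums : List Int) : List Int :=
  (pvSolve nums).1

-- ===== PRECONDITION & SPEC =====
def Spec_product_array_without_current_element (nums : List Int) (out : List Int) : Prop := out = product_array_without_current_element_alt nums
instance (nums : List Int) (out : List Int) : Decidable (Spec_product_array_without_current_element nums out) := by unfold Spec_product_array_without_current_element; infer_instance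

-- ===== CLAIM (what is proved, stated in full; the proofs are below) =====
def Claim_equal_product_array_without_current_element : Prop := ∀ (nums : List Int), Dom_product_array_without_current_element nums → Spec_product_array_without_current_element nums (product_array_without_current_element nums)

-- ===== LEMMAS AND PROOFS =====

-- the canonical answer: element j is (product before j) * (product after j)
def pvF (a : List Int) : List Int :=
  (List.range a.length).map (fun j => (a.take j).prod * (a.drop (j + 1)).prod)

-- splitting pvF at a cut point 0 < m < a.length
lemma pvF_split (a : List Int) (m : ℕ) (hm : m ≤ a.length) :
    pvF a = (pvF (a.take m)).map (· * (a.drop m).prod)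
          ++ (pvF (a.drop m)).map (fun z => (a.take m).prod * z) := by
  unfold pvF
  have hlt : (a.take m).length = m := by simp [hm]
  have hdl : (a.drop m).length = a.length - m := by simp
  obtain ⟨k, hk⟩ : ∃ k, a.length = m + k := ⟨a.length - m, by omega⟩
  rw [hlt, hdl, hk, Nat.add_sub_cancel_left, List.map_map, List.map_map,
    List.range_add, List.map_append, List.map_map]
  refine congrArg₂ _ ?_ ?_
  · apply List.map_congr_left
    intro j hj
    rw [List.mem_range] at hj
    simp only [Function.comp_apply]
    rw [List.take_take, min_eq_left (by omega),
      show a.drop (j+1) = (a.take m).drop (j+1) ++ a.drop m from by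
        conv_lhs => rw [← List.take_append_drop m a]
        rw [List.drop_append_of_le_length (by rw [hlt]; omega)],
      List.prod_append]
    ring
  · apply List.map_congr_left
    intro j hj
    rw [List.mem_range] at hj
    simp only [Function.comp_apply]
    rw [show a.take (m + j) = a.take m ++ (a.drop m).take j from by
        rw [List.take_add],
      show a.drop (m + j + 1) = (a.drop m).drop (j + 1) from by
        rw [List.drop_drop]; ring_nf,
      List.prod_append]
    ring

lemma pvSolve_eq_aux (n : ℕ) : ∀ a : List Int, a.length ≤ n → pvSolve a = (pvF a, a.prod) := by
  induction n with
  | zero =>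
    intro a ha
    cases a with
    | nil => simp [pvSolve, pvF]
    | cons x xs => simp at ha
  | succ n ih =>
    intro a ha
    match a with
    | [] => simp [pvSolve, pvF]
    | [x] => simp [pvSolve, pvF, List.range_succ]
    | x :: y :: rest =>
      have hlen : (x :: y :: rest).length = rest.length + 2 := by simp
      simp only [pvSolve]
      rw [ih _ (by simp; omega),
        ih _ (by simp; omega)]
      refine Prod.ext ?_ ?_
      · exact (pvF_split _ _ (by omega)).symm
      · show ((x :: y :: rest).take _).prod * ((x :: y :: rest).drop _).prod = _
        rw [← List.prod_append, List.take_append_drop]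

lemma pvSolve_eq (a : List Int) : pvSolve a = (pvF a, a.prod) :=
  pvSolve_eq_aux a.length a (le_refl _)

-- ---- A-side: invariant of A's index loop ----
def pvLoopA (nums : List Int) (m : ℕ) : List Int × List Int :=
  (PySem.List.pyRange 1 (m : Int) 1).foldl (pvStepA nums)
    (List.replicate nums.length 1, List.replicate nums.length 1)

lemma a_inv (nums : List Int) (m : ℕ) (h1 : 1 ≤ m) : m ≤ nums.length →
    (pvLoopA nums m).1.length = nums.length ∧ (pvLoopA nums m).2.length = nums.length ∧
    (∀ j : ℕ, j < nums.length →
        (pvLoopA nums m).1.getD j 0 = if j < m then (nums.take j).prod else 1) ∧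
    (∀ j : ℕ, j < nums.length →
        (pvLoopA nums m).2.getD j 0 =
          if nums.length - m ≤ j then (nums.drop (j + 1)).prod else 1) := by
  induction m, h1 using Nat.le_induction with
  | base =>
    intro _
    have hnil : pvLoopA nums 1 = (List.replicate nums.length 1, List.replicate nums.length 1) := by
      unfold pvLoopA
      rw [show ((1 : ℕ) : Int) = 1 from rfl, PySem.List.pyRange_one_eq_nil (le_refl 1)]
      rfl
    rw [hnil]
    refine ⟨by simp, by simp, ?_, ?_⟩
    · intro j hj
      rw [List.getD_eq_getElem _ _ (by simpa using hj), List.getElem_replicate]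
      split
      · next h => have : j = 0 := by omega
                  subst this; simp
      · rfl
    · intro j hj
      rw [List.getD_eq_getElem _ _ (by simpa using hj), List.getElem_replicate]
      split
      · next h =>
        have : nums.length ≤ j + 1 := by omega
        rw [List.drop_eq_nil_of_le this, List.prod_nil]
      · rfl
  | succ m hm ih =>
    intro h2
    obtain ⟨hl, hr, hL, hR⟩ := ih (by omega)
    have hstep : pvLoopA nums (m + 1) = pvStepA nums (pvLoopA nums m) (m : Int) := by
      unfold pvLoopA
      rw [show ((m + 1 : ℕ) : Int) = (m : Int) + 1 from by push_cast; ring,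
        PySem.List.pyRange_one_succ_right (by exact_mod_cast hm), List.foldl_append]
      rfl
    have e1 : (m : Int) - 1 = ((m - 1 : ℕ) : Int) := by omega
    have e2 : ((nums.length : Int)) - 1 - (m : Int) = ((nums.length - 1 - m : ℕ) : Int) := by omega
    have e3 : ((nums.length : Int)) - (m : Int) = ((nums.length - m : ℕ) : Int) := by omega
    rw [hstep]
    simp only [pvStepA, e1, e2, e3, PySem.List.pySetD_natCast, PySem.List.pyGetD_natCast]
    have hlen1 : (((pvLoopA nums m).1.set m ((pvLoopA nums m).1.getD (m-1) 0 * nums.getD (m-1) 0))).length = nums.length := by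
      simp [hl]
    have hlen2 : (((pvLoopA nums m).2.set (nums.length - 1 - m)
        ((pvLoopA nums m).2.getD (nums.length - m) 0 * nums.getD (nums.length - m) 0))).length = nums.length := by
      simp [hr]
    refine ⟨hlen1, hlen2, ?_, ?_⟩
    · intro j hj
      rw [List.getD_eq_getElem _ _ (by rw [hlen1]; exact hj), List.getElem_set]
      by_cases hjm : m = j
      · subst hjm
        rw [if_pos rfl, hL (m - 1) (by omega), if_pos (by omega),
          List.getD_eq_getElem _ _ (by omega : m - 1 < nums.length)]
        have hp := List.prod_take_succ nums (m - 1) (by omega)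
        rw [show m - 1 + 1 = m from by omega] at hp
        rw [← hp, if_pos (by omega)]
      · rw [if_neg hjm, ← List.getD_eq_getElem _ 0 (by rw [hl]; exact hj), hL j hj]
        split_ifs with hA hB hB
        · rfl
        · omega
        · omega
        · rfl
    · intro j hj
      rw [List.getD_eq_getElem _ _ (by rw [hlen2]; exact hj), List.getElem_set]
      by_cases hjm : nums.length - 1 - m = j
      · subst hjm
        rw [if_pos rfl, hR (nums.length - m) (by omega), if_pos (by omega),
          List.getD_eq_getElem _ _ (by omega : nums.length - m < nums.length)]
        have hd := List.drop_eq_getElem_cons (by omega : nums.length - m < nums.length)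
        rw [if_pos (by omega), show nums.length - 1 - m + 1 = nums.length - m from by omega, hd,
          List.prod_cons]
        exact mul_comm _ _
      · rw [if_neg hjm, ← List.getD_eq_getElem _ 0 (by rw [hr]; exact hj), hR j hj]
        split_ifs with hA hB hB
        · rfl
        · omega
        · omega
        · rfl

lemma a_eq (nums : List Int) :
    product_array_without_current_element nums = pvF nums := by
  rcases Nat.eq_zero_or_pos nums.length with hn | hn
  · rw [List.eq_nil_of_length_eq_zero hn]
    rfl
  · obtain ⟨hl, hr, hL, hR⟩ := a_inv nums nums.length hn (le_refl _)
    show (PySem.List.pyRange 0 (nums.length : Int) 1).foldl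
        (fun res i => res ++ [PySem.List.pyGetD (pvLoopA nums nums.length).1 i 0 *
          PySem.List.pyGetD (pvLoopA nums nums.length).2 i 0]) [] = _
    rw [PySem.List.foldl_append_singleton_eq_map, List.nil_append,
      PySem.List.pyRange_zero_nat, List.map_map]
    apply List.map_congr_left
    intro j hj
    rw [List.mem_range] at hj
    simp only [Function.comp_apply, PySem.List.pyGetD_natCast]
    rw [hL j hj, hR j hj, if_pos hj, if_pos (by omega)]

-- ===== VERDICT (by name: the statement is the Claim_ definition above) =====
theorem product_array_without_current_element_spec : Claim_equal_product_array_without_current_element := by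
  intro nums _
  show _ = _
  rw [a_eq]
  unfold product_array_without_current_element_alt
  rw [pvSolve_eq]
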